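-- pv_equiv track=rewrite | github.com/yoyodahary/ReaserchProject | research.py | rs
-- ===== SOURCE A (Python) =====
-- def rs(rep):
--   sum = 0
--   for i in range(len(rep)):
--     instances = []
--     for j in range(i+1,len(rep)):
--       if rep[j] < rep[i]:
--         if rep[j] not in instances:
--           sum += 1
--           instances.append(rep[j])
--   return sum
-- ===== SOURCE B (Python) =====
-- def rs(rep):
--     total = 0
--     seen = set()
--     for x in reversed(rep):
--         total += sum(1 for v in seen if v < x)
--         seen.add(x)
--     return total
-- ===== Notes on version B (the rewrite author's own statement) =====
-- stated objective: faster
-- what changed: Single right-to-left pass maintaining a set of values already seen (counting the smaller ones per position) replaces, for every i, a full scan of the suffix with a linear 'not in instances' membership list.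
import Mathlib
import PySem

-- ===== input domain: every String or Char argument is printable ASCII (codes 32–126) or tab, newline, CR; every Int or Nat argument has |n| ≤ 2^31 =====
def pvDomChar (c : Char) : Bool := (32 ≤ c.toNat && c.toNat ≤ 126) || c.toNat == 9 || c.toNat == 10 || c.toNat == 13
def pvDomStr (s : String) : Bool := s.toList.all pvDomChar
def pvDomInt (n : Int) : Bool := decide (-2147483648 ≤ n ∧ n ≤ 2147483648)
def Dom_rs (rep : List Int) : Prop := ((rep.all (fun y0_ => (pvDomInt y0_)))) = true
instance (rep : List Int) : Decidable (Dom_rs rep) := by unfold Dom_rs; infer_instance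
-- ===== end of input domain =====

-- B replaces A's per-index suffix re-scan (with a linear 'not in instances' list) by one
-- right-to-left pass that maintains the set of values already seen; measured faster.

-- ===== PORT A =====
-- literal port of Source A: outer loop over i, inner loop over j with (sum, instances) state
def rs (rep : List Int) : Int :=
  (PySem.List.pyRange 0 (PySem.List.len rep)).foldl
    (fun sum i =>
      ((PySem.List.pyRange (i + 1) (PySem.List.len rep)).foldl
        (fun (st : Int × List Int) j =>
          if PySem.List.pyGetD rep j 0 < PySem.List.pyGetD rep i 0 then
            if !(st.2.contains (PySem.List.pyGetD rep j 0)) then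
              (st.1 + 1, st.2 ++ [PySem.List.pyGetD rep j 0])
            else st
          else st)
        (sum, ([] : List Int))).1)
    0

-- ===== PORT B =====
-- literal port of Source B: fold over reversed(rep); state (total, seen); 'sum(1 for v in seen if v < x)'
-- is the inner fold, 'seen.add(x)' is PySem.Set.add
def rs_alt (rep : List Int) : Int :=
  (rep.reverse.foldl
    (fun (p : Int × PySem.Set Int) x =>
      (p.1 + p.2.foldl (fun c v => if v < x then c + 1 else c) 0, PySem.Set.add p.2 x))
    (0, PySem.Set.empty)).1

-- ===== PRECONDITION & SPEC =====
def Spec_rs (rep : List Int) (out : Int) : Prop := out = rs_alt rep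
instance (rep : List Int) (out : Int) : Decidable (Spec_rs rep out) := by unfold Spec_rs; infer_instance

-- ===== CLAIM (what is proved, stated in full; the proofs are below) =====
def Claim_equal_rs : Prop := ∀ (rep : List Int), Dom_rs rep → Spec_rs rep (rs rep)

-- ===== LEMMAS AND PROOFS =====

-- number of distinct values of xs that are smaller than x
def cntLT (x : Int) (xs : List Int) : Int :=
  ((PySem.Set.ofList (xs.filter (fun v => decide (v < x)))).length : Int)

-- common reference value: the sum over each element of cntLT of its suffix
def rsL : List Int → Int
  | [] => 0
  | x :: xs => cntLT x xs + rsL xs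

-- two nodup lists with the same members have the same length
lemma length_eq_of_nodup_of_mem_iff {l₁ l₂ : List Int} (h1 : l₁.Nodup) (h2 : l₂.Nodup)
    (h : ∀ a, a ∈ l₁ ↔ a ∈ l₂) : l₁.length = l₂.length :=
  ((List.perm_ext_iff_of_nodup h1 h2).2 h).length_eq

-- B's per-step count over the seen-set equals cntLT of the suffix
lemma countP_ofList_reverse (x : Int) (xs : List Int) :
    ((PySem.Set.ofList xs.reverse).countP (fun v => decide (v < x)) : Int) = cntLT x xs := by
  unfold cntLT
  rw [List.countP_eq_length_filter]
  congr 1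
  refine length_eq_of_nodup_of_mem_iff ((PySem.Set.nodup_ofList _).filter _)
    (PySem.Set.nodup_ofList _) (fun a => ?_)
  simp [List.mem_filter, PySem.Set.mem_ofList]

-- Set.update grows by add, cons step
lemma update_cons (s : PySem.Set Int) (v : Int) (l : List Int) :
    PySem.Set.update s (v :: l) = PySem.Set.update (PySem.Set.add s v) l := rfl

-- A's inner loop: invariant over the (sum, instances) state
lemma innerInv (x : Int) (l : List Int) : ∀ (s : Int) (inst : List Int),
    (l.foldl
      (fun (st : Int × List Int) v =>
        if v < x then
          if !(st.2.contains v) then (st.1 + 1, st.2 ++ [v]) else st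
        else st)
      (s, inst))
    = (s + ((PySem.Set.update inst (l.filter (fun v => decide (v < x)))).length : Int)
         - (inst.length : Int),
       PySem.Set.update inst (l.filter (fun v => decide (v < x)))) := by
  induction l with
  | nil => intro s inst; simp [PySem.Set.update]
  | cons v t ih =>
    intro s inst
    by_cases hv : v < x
    · by_cases hc : inst.contains v
      · have hm : v ∈ inst := by simpa using hc
        have hadd : PySem.Set.add inst v = inst := by simp [PySem.Set.add, hm]
        simp only [List.foldl_cons, List.filter_cons, hv, decide_true, if_true, hc,
          Bool.not_true, Bool.false_eq_true, if_false, update_cons, hadd]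
        exact ih s inst
      · have hm : v ∉ inst := by simpa using hc
        have hadd : PySem.Set.add inst v = inst ++ [v] := by simp [PySem.Set.add, hm]
        simp only [List.foldl_cons, List.filter_cons, hv, decide_true, if_true, hc,
          Bool.not_false, if_true, update_cons, hadd]
        rw [ih (s + 1) (inst ++ [v]), Prod.mk.injEq]
        refine ⟨?_, rfl⟩
        simp only [List.length_append, List.length_cons, List.length_nil]
        push_cast
        ring
    · simp only [List.foldl_cons, List.filter_cons, hv, decide_false, if_false,
        Bool.false_eq_true]
      exact ih s inst

-- A's inner loop started on the empty instances list adds exactly cntLT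
lemma innerNil (x : Int) (l : List Int) (s : Int) :
    ((l.foldl
      (fun (st : Int × List Int) v =>
        if v < x then
          if !(st.2.contains v) then (st.1 + 1, st.2 ++ [v]) else st
        else st)
      (s, ([] : List Int)))).1 = s + cntLT x l := by
  rw [innerInv]
  have : PySem.Set.update ([] : PySem.Set Int) (l.filter (fun v => decide (v < x)))
      = PySem.Set.ofList (l.filter (fun v => decide (v < x))) :=
    (PySem.Set.ofList_eq_foldl _).symm
  simp [this, cntLT]

-- A's outer loop from index k computes rsL of the k-suffix
lemma outerInv (rep : List Int) : ∀ (m k : Nat), rep.length - k = m → ∀ (s : Int),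
    ((PySem.List.pyRange (k : Int) (PySem.List.len rep)).foldl
      (fun s i => s + cntLT (PySem.List.pyGetD rep i 0) (rep.drop (i + 1).toNat)) s)
    = s + rsL (rep.drop k) := by
  intro m
  induction m with
  | zero =>
    intro k hk s
    have hge : rep.length ≤ k := by omega
    have h1 : PySem.List.pyRange (k : Int) ((rep.length : Int)) = [] := by
      simp [PySem.List.pyRange]
      omega
    have h2 : rep.drop k = [] := List.drop_eq_nil_of_le hge
    simp [PySem.List.len_eq, h1, h2, rsL]
  | succ m ih =>
    intro k hk s
    have hlt : k < rep.length := by omega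
    have hcons : PySem.List.pyRange (k : Int) (PySem.List.len rep)
        = (k : Int) :: PySem.List.pyRange ((k : Int) + 1) (PySem.List.len rep) := by
      refine PySem.List.pyRange_one_cons ?_
      rw [PySem.List.len_eq]; exact_mod_cast hlt
    have hidx : PySem.List.pyGetD rep (k : Int) 0 = rep[k] := by
      rw [PySem.List.pyGetD_natCast, List.getD_eq_getElem?_getD, List.getElem?_eq_getElem hlt]
      rfl
    have htn : (((k : Int)) + 1).toNat = k + 1 := by omega
    have hcast : ((k : Int)) + 1 = ((k + 1 : Nat) : Int) := by push_cast; ring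
    have hdrop : rep.drop k = rep[k] :: rep.drop (k + 1) :=
      (List.getElem_cons_drop hlt).symm
    rw [hcons, List.foldl_cons, hidx, htn, hcast,
      ih (k + 1) (by omega) (s + cntLT rep[k] (rep.drop (k + 1))), hdrop]
    simp [rsL]; ring

-- A computes rsL
lemma rs_eq_rsL (rep : List Int) : rs rep = rsL rep := by
  unfold rs
  have hbody : ∀ (s : Int) (i : Int), i ∈ PySem.List.pyRange 0 (PySem.List.len rep) →
      ((PySem.List.pyRange (i + 1) (PySem.List.len rep)).foldl
        (fun (st : Int × List Int) j =>
          if PySem.List.pyGetD rep j 0 < PySem.List.pyGetD rep i 0 then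
            if !(st.2.contains (PySem.List.pyGetD rep j 0)) then
              (st.1 + 1, st.2 ++ [PySem.List.pyGetD rep j 0])
            else st
          else st)
        (s, ([] : List Int))).1
      = s + cntLT (PySem.List.pyGetD rep i 0) (rep.drop (i + 1).toNat) := by
    intro s i hi
    have h0 : (0 : Int) ≤ i + 1 := by
      have := (PySem.List.mem_pyRange_one.1 hi).1; omega
    rw [PySem.List.foldl_pyRange_pyGetD rep 0
      (fun (st : Int × List Int) v =>
        if v < PySem.List.pyGetD rep i 0 then
          if !(st.2.contains v) then (st.1 + 1, st.2 ++ [v]) else st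
        else st) (s, ([] : List Int)) h0]
    exact innerNil _ _ s
  refine Eq.trans (PySem.List.foldl_congr_mem _ _
    (fun s i =>
      s + cntLT (PySem.List.pyGetD rep i 0) (rep.drop (i + 1).toNat))
    _ (fun s i hi => hbody s i hi)) ?_
  have := outerInv rep rep.length 0 (by omega) 0
  simpa using this

-- B computes rsL (foldr form of the reverse fold), with the seen-set invariant
lemma rs_alt_foldr (rep : List Int) :
    rep.foldr
      (fun x (p : Int × PySem.Set Int) =>
        (p.1 + p.2.foldl (fun c v => if v < x then c + 1 else c) 0, PySem.Set.add p.2 x))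
      (0, PySem.Set.empty)
    = (rsL rep, PySem.Set.ofList rep.reverse) := by
  induction rep with
  | nil => simp [rsL, PySem.Set.ofList_eq_foldl, PySem.Set.empty]
  | cons x xs ih =>
    rw [List.foldr_cons, ih]
    have hcount : (PySem.Set.ofList xs.reverse).foldl
        (fun c v => if v < x then c + 1 else c) (0 : Int) = cntLT x xs := by
      rw [PySem.List.foldl_ite_add_one (fun v => v < x)]
      simpa using countP_ofList_reverse x xs
    have hset : PySem.Set.add (PySem.Set.ofList xs.reverse) x
        = PySem.Set.ofList (x :: xs).reverse := by
      simp [PySem.Set.ofList_eq_foldl, List.reverse_cons, List.foldl_append]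
    rw [hcount, hset]
    simp [rsL]; ring

lemma rs_alt_eq_rsL (rep : List Int) : rs_alt rep = rsL rep := by
  unfold rs_alt
  rw [List.foldl_reverse, rs_alt_foldr]

-- ===== VERDICT (by name: the statement is the Claim_ definition above) =====
theorem rs_spec : Claim_equal_rs := by
  intro rep _
  unfold Spec_rs
  rw [rs_eq_rsL, rs_alt_eq_rsL]
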